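-- pv_equiv track=rewrite | github.com/DexBrox/constructionPlans_detect | OCR/scripts/OCR_evaluate.py | aggregate_sum_data
-- ===== SOURCE A (Python) =====
-- def aggregate_sum_data(sum_data):
--     # Verwende ein Dictionary, um die Texte basierend auf den GT-Zeilen zu konsolidieren
--     aggregated_dict = {}
--     for poly_label, text in sum_data:
--         if poly_label in aggregated_dict:
--             # Füge den aktuellen Text zum vorhandenen Eintrag hinzu
--             aggregated_dict[poly_label] += " " + text
--         else:
--             # Erstelle einen neuen Eintrag im Dictionary für ein neues GT-Label
--             aggregated_dict[poly_label] = text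
--
--     # Konvertiere das Dictionary zurück in eine Liste von Tupeln
--     aggregated_data = [(label, text) for label, text in aggregated_dict.items()]
--     return aggregated_data
-- ===== SOURCE B (Python) =====
-- def aggregate_sum_data(sum_data):
--     # Partition-based aggregation without a dictionary: repeatedly take the
--     # first remaining label, join all of its texts in one scan, and drop those
--     # pairs; distinct labels come out in first-occurrence order, each label's
--     # texts in original order, exactly as dict insertion order would give.
--     result = []
--     remaining = sum_data
--     while remaining:
--         label = remaining[0][0]
--         result.append((label, " ".join(t for l, t in remaining if l == label)))
--         remaining = [(l, t) for l, t in remaining if l != label]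
--     return result
-- ===== Notes on version B (the rewrite author's own statement) =====
-- stated objective: alternative
-- what changed: B uses no dictionary at all: a partition loop that repeatedly takes the first remaining label, joins all its texts in one scan of the remaining pairs, and filters those pairs out, instead of A's single left-to-right pass accumulating concatenated strings in a dict.
import Mathlib
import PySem

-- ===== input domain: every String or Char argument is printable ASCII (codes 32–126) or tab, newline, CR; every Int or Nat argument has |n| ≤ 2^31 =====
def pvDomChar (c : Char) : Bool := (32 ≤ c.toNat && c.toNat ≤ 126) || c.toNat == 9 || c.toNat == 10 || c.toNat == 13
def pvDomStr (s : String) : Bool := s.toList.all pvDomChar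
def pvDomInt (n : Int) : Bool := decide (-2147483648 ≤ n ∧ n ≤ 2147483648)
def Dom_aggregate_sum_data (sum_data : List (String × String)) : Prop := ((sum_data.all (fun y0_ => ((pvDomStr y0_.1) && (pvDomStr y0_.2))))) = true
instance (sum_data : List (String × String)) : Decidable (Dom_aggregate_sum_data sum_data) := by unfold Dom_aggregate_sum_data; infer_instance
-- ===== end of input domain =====

-- B replaces A's dict accumulation by a dict-free partition loop (first remaining label, join its texts, filter them out); same result, alternative algorithm.


-- ===== PORT A =====
-- 'aggregated_dict[poly_label] += " " + text' — string concatenation done exactly, on the char lists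
def aggA (d : PySem.Dict String String) (p : String × String) : PySem.Dict String String :=
  if d.contains p.1 then
    d.insert p.1 (String.ofList ((d.getD p.1 "").toList ++ ' ' :: p.2.toList))
  else
    d.insert p.1 p.2

def aggregate_sum_data (sum_data : List (String × String)) : List (String × String) :=
  let aggregated_dict := sum_data.foldl aggA PySem.Dict.empty
  aggregated_dict.items.map (fun p => (p.1, p.2))

-- ===== PORT B =====
-- the while loop: 'result' accumulator, 'remaining' shrinks by filtering out the first label
def altLoop (result : List (String × String)) (remaining : List (String × String)) :
    List (String × String) :=
  match remaining with
  | [] => result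
  | p :: rest =>
      altLoop
        (result ++ [(p.1, PySem.Str.join " " (((p :: rest).filter (fun q => q.1 == p.1)).map Prod.snd))])
        ((p :: rest).filter (fun q => q.1 != p.1))
termination_by remaining.length
decreasing_by
  simp only [List.filter_cons, bne_self_eq_false, List.length_cons]
  exact Nat.lt_succ_of_le (List.length_filter_le _ _)

def aggregate_sum_data_alt (sum_data : List (String × String)) : List (String × String) :=
  altLoop [] sum_data

-- ===== PRECONDITION & SPEC =====
def Spec_aggregate_sum_data (sum_data : List (String × String)) (out : List (String × String)) : Prop := out = aggregate_sum_data_alt sum_data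
instance (sum_data : List (String × String)) (out : List (String × String)) : Decidable (Spec_aggregate_sum_data sum_data out) := by unfold Spec_aggregate_sum_data; infer_instance

-- ===== CLAIM (what is proved, stated in full; the proofs are below) =====
def Claim_equal_aggregate_sum_data : Prop := ∀ (sum_data : List (String × String)), Dom_aggregate_sum_data sum_data → Spec_aggregate_sum_data sum_data (aggregate_sum_data sum_data)

-- ===== LEMMAS AND PROOFS =====

-- proof-side model: a dict of per-label fragment lists, and its join
def joinVal (l : List String) : String := PySem.Str.join " " l

def aggB (d : PySem.Dict String (List String)) (p : String × String) :
    PySem.Dict String (List String) :=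
  d.modify p.1 [] (fun l => l ++ [p.2])

-- invariant tying A's dict to the fragment-list dict
def AggRel (dA : PySem.Dict String String) (dB : PySem.Dict String (List String)) : Prop :=
  dA.items = dB.items.map (fun p => (p.1, joinVal p.2)) ∧ ∀ p ∈ dB.items, p.2 ≠ []

theorem chars_join_append_singleton (sep ys : List Char) (xs : List (List Char)) (h : xs ≠ []) :
    PySem.Chars.join sep (xs ++ [ys]) = PySem.Chars.join sep xs ++ sep ++ ys := by
  induction xs with
  | nil => exact absurd rfl h
  | cons x xs ih =>
    cases xs with
    | nil => simp [PySem.Chars.join, List.intercalate, List.intersperse]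
    | cons y ys' =>
      have h2 := ih (by simp)
      simp only [PySem.Chars.join, List.intercalate] at h2 ⊢
      simp only [List.cons_append, List.intersperse, List.flatten_cons] at h2 ⊢
      simp [h2]

theorem joinVal_append_singleton (l : List String) (t : String) (h : l ≠ []) :
    joinVal (l ++ [t]) = String.ofList ((joinVal l).toList ++ ' ' :: t.toList) := by
  have hmap : (l ++ [t]).map String.toList = l.map String.toList ++ [t.toList] := by simp
  have hne : l.map String.toList ≠ [] := by simpa using h
  simp only [joinVal, PySem.Str.join, hmap,
    chars_join_append_singleton _ t.toList (l.map String.toList) hne]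
  simp

theorem joinVal_singleton (t : String) : joinVal [t] = t := by
  simp [joinVal, PySem.Str.join, PySem.Chars.join, List.intercalate]

theorem aggRel_step (dA : PySem.Dict String String) (dB : PySem.Dict String (List String))
    (p : String × String) (hR : AggRel dA dB) : AggRel (aggA dA p) (aggB dB p) := by
  obtain ⟨hitems, hne2⟩ := hR
  have hkeys : ∀ k, dA.contains k = dB.contains k := by
    intro k
    simp [PySem.Dict.contains, hitems, List.any_map, Function.comp_def]
  have hget : dA.get? p.1 = (dB.get? p.1).map joinVal := by
    simp [PySem.Dict.get?, hitems, List.find?_map, Function.comp_def]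
  by_cases hc : dB.contains p.1 = true
  · have hcA : dA.contains p.1 = true := by rw [hkeys]; exact hc
    obtain ⟨q, hfind⟩ : ∃ q, dB.items.find? (fun r => r.1 == p.1) = some q := by
      have hc' := hc
      simp only [PySem.Dict.contains, List.any_eq_true] at hc'
      obtain ⟨x, hx, hbx⟩ := hc'
      cases hq : dB.items.find? (fun r => r.1 == p.1) with
      | none => exact absurd hbx (by simpa using List.find?_eq_none.mp hq x hx)
      | some q => exact ⟨q, rfl⟩
    have hqmem : q ∈ dB.items := List.mem_of_find?_eq_some hfind
    have hqne : q.2 ≠ [] := hne2 q hqmem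
    have hgetB : dB.get? p.1 = some q.2 := by simp [PySem.Dict.get?, hfind]
    have hgetDB : dB.getD p.1 [] = q.2 := by simp [PySem.Dict.getD, hgetB]
    have hgetDA : dA.getD p.1 "" = joinVal q.2 := by
      simp [PySem.Dict.getD, hget, hgetB]
    constructor
    · simp only [aggA, aggB, PySem.Dict.modify, hcA, if_pos, PySem.Dict.insert, hc]
      simp only [hgetDB, hgetDA, hitems, List.map_map]
      apply List.map_congr_left
      intro r hr
      by_cases hrk : r.1 == p.1
      · simp [Function.comp, hrk,
          joinVal_append_singleton q.2 p.2 hqne]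
      · simp [Function.comp, hrk]
    · intro r hr
      simp only [aggB, PySem.Dict.modify, PySem.Dict.insert, hc, if_pos] at hr
      simp only [List.mem_map] at hr
      obtain ⟨s, hs, hrs⟩ := hr
      by_cases hsk : s.1 == p.1
      · simp [hsk] at hrs; subst hrs; simp
      · simp [hsk] at hrs; subst hrs; exact hne2 s hs
  · have hcA : dA.contains p.1 = false := by rw [hkeys]; simpa using hc
    have hc' : dB.items.any (fun r => r.1 == p.1) = false := by
      have hcf : dB.contains p.1 = false := by simpa using hc
      exact hcf
    have hfind : List.find? (fun r => r.1 == p.1) dB.items = none := by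
      rw [List.find?_eq_none]
      intro x hx
      simpa using List.any_eq_false.mp hc' x hx
    have hgetB : dB.get? p.1 = none := by
      simp [PySem.Dict.get?, hfind]
    have hgetDB : dB.getD p.1 [] = [] := by simp [PySem.Dict.getD, hgetB]
    constructor
    · simp only [aggA, aggB, PySem.Dict.modify, PySem.Dict.insert, hcA, hc,
        Bool.false_eq_true, if_false, hgetDB]
      simp [hitems, joinVal_singleton]
    · intro r hr
      simp only [aggB, PySem.Dict.modify, PySem.Dict.insert, hc, Bool.false_eq_true,
        if_false, hgetDB, List.mem_append, List.mem_singleton] at hr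
      rcases hr with hr | hr
      · exact hne2 r hr
      · subst hr; simp

theorem aggRel_foldl (sum_data : List (String × String))
    (dA : PySem.Dict String String) (dB : PySem.Dict String (List String))
    (hR : AggRel dA dB) : AggRel (sum_data.foldl aggA dA) (sum_data.foldl aggB dB) := by
  induction sum_data generalizing dA dB with
  | nil => exact hR
  | cons p rest ih => exact ih _ _ (aggRel_step dA dB p hR)

-- partition-level reference: what the fragment-list dict's items are, computed B's way
def gather (xs : List (String × String)) (k : String) : List String :=
  (xs.filter (fun q => q.1 == k)).map Prod.snd

def refAgg : List (String × String) → List (String × List String)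
  | [] => []
  | p :: rest =>
      (p.1, gather (p :: rest) p.1) :: refAgg ((p :: rest).filter (fun q => q.1 != p.1))
termination_by xs => xs.length
decreasing_by
  simp only [List.filter_cons, bne_self_eq_false, List.length_cons]
  exact Nat.lt_succ_of_le (List.length_filter_le _ _)

theorem altLoop_eq (remaining : List (String × String)) :
    ∀ acc, altLoop acc remaining = acc ++ (refAgg remaining).map (fun q => (q.1, joinVal q.2)) := by
  match remaining with
  | [] => intro acc; simp [altLoop, refAgg]
  | p :: rest =>
    intro acc
    rw [altLoop, refAgg]
    rw [altLoop_eq ((p :: rest).filter (fun q => q.1 != p.1))]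
    simp [gather, joinVal, List.append_assoc]
termination_by remaining.length
decreasing_by
  simp only [List.filter_cons, bne_self_eq_false, List.length_cons]
  exact Nat.lt_succ_of_le (List.length_filter_le _ _)

theorem gather_cons_self (p : String × String) (rest : List (String × String)) :
    gather (p :: rest) p.1 = p.2 :: gather rest p.1 := by
  simp [gather]

theorem gather_cons_of_ne (p : String × String) (rest : List (String × String)) (k : String)
    (h : ¬ (p.1 = k)) : gather (p :: rest) k = gather rest k := by
  simp [gather, h]

theorem gather_filter (rest : List (String × String)) (c : (String × String) → Bool)
    (k : String) (hk : ∀ q ∈ rest, q.1 = k → c q = true) :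
    gather (rest.filter c) k = gather rest k := by
  unfold gather
  rw [List.filter_filter]
  congr 1
  apply List.filter_congr
  intro q hq
  by_cases h : q.1 = k
  · simp [h, hk q hq h]
  · simp [h]

-- the key characterisation of the fragment-list dict fold by the partition recursion
theorem foldl_aggB_items (xs : List (String × String)) :
    ∀ (d : PySem.Dict String (List String)), d.keys.Nodup →
      (xs.foldl aggB d).items =
        d.items.map (fun q => (q.1, q.2 ++ gather xs q.1)) ++
        refAgg (xs.filter (fun q => !(d.contains q.1))) := by
  induction xs with
  | nil => intro d _; simp [refAgg, gather]
  | cons p rest ih =>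
    intro d hnd
    have hstep : (p :: rest).foldl aggB d = rest.foldl aggB (aggB d p) := rfl
    have hndB : (aggB d p).keys.Nodup := by
      unfold aggB PySem.Dict.modify
      exact PySem.Dict.nodup_keys_insert _ _ _ hnd
    have hcontB : ∀ k, (aggB d p).contains k = (k == p.1 || d.contains k) := by
      intro k
      unfold aggB PySem.Dict.modify
      exact PySem.Dict.contains_insert _ _ _ _
    rw [hstep, ih _ hndB]
    by_cases hc : d.contains p.1 = true
    · -- label already present: its dict entry grows in place
      have hitemsB : (aggB d p).items =
          d.items.map (fun r => if r.1 == p.1 then (p.1, d.getD p.1 [] ++ [p.2]) else r) := by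
        unfold aggB PySem.Dict.modify
        rw [PySem.Dict.items_insert_of_contains _ _ hc]
      congr 1
      · rw [hitemsB, List.map_map]
        apply List.map_congr_left
        intro r hr
        by_cases hrk : r.1 = p.1
        · have hgetD : d.getD p.1 [] = r.2 := by
            apply PySem.Dict.getD_of_mem_items
            · have : r = (p.1, r.2) := by rw [← hrk]
              rw [← this]; exact hr
            · exact hnd
          simp [Function.comp, hrk, hgetD, gather_cons_self]
        · have : (r.1 == p.1) = false := by simpa using hrk
          simp [Function.comp, this, gather_cons_of_ne p rest r.1 (fun h => hrk h.symm)]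
      · congr 1
        rw [List.filter_cons]
        have : (!(d.contains p.1)) = false := by simp [hc]
        rw [this]
        simp only [Bool.false_eq_true, if_false]
        apply List.filter_congr
        intro q hq
        by_cases hqk : q.1 = p.1
        · simp [hcontB, hqk, hc]
        · have : (q.1 == p.1) = false := by simpa using hqk
          simp [hcontB, this]
    · -- new label: appended at the end of the dict, first of the partition remainder
      have hcf : d.contains p.1 = false := by simpa using hc
      have hkey : ∀ r ∈ d.items, r.1 ≠ p.1 := by
        intro r hr hrk
        have : d.items.any (fun q => q.1 == p.1) = true :=
          List.any_eq_true.mpr ⟨r, hr, by simp [hrk]⟩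
        exact hc this
      have hgetD : d.getD p.1 [] = [] := PySem.Dict.getD_of_not_contains _ _ hcf
      have hitemsB : (aggB d p).items = d.items ++ [(p.1, [p.2])] := by
        unfold aggB PySem.Dict.modify
        rw [PySem.Dict.items_insert_of_not_contains _ _ hcf, hgetD]
        simp
      rw [hitemsB, List.map_append]
      have hfilter : (p :: rest).filter (fun q => !(d.contains q.1)) =
          p :: rest.filter (fun q => !(d.contains q.1)) := by
        rw [List.filter_cons]; simp [hcf]
      rw [hfilter, refAgg]
      have h1 : gather (rest.filter (fun q => !(d.contains q.1))) p.1 = gather rest p.1 := by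
        apply gather_filter
        intro q _ hqk
        simp [hqk, hcf]
      rw [gather_cons_self, h1]
      simp only [List.map_cons, List.map_nil, List.nil_append, List.cons_append]
      rw [List.append_assoc, List.singleton_append]
      congr 1
      · apply List.map_congr_left
        intro r hr
        rw [gather_cons_of_ne p rest r.1 (fun h => hkey r hr h.symm)]
      · congr 1
        -- the partition remainders coincide
        rw [List.filter_cons]
        simp only [bne_self_eq_false, Bool.false_eq_true, if_false]
        rw [List.filter_filter]
        congr 1
        apply List.filter_congr
        intro q _
        by_cases hqk : q.1 = p.1
        · simp [hcontB, hqk]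
        · have : (q.1 == p.1) = false := by simpa using hqk
          simp [hcontB, this, hqk]

-- ===== VERDICT (by name: the statement is the Claim_ definition above) =====
theorem aggregate_sum_data_spec : Claim_equal_aggregate_sum_data := by
  intro sum_data _
  unfold Spec_aggregate_sum_data
  have hrel := aggRel_foldl sum_data PySem.Dict.empty PySem.Dict.empty
    ⟨by simp [PySem.Dict.empty], by simp [PySem.Dict.empty]⟩
  have hchar := foldl_aggB_items sum_data PySem.Dict.empty (by simp [PySem.Dict.keys, PySem.Dict.empty])
  have hfilt : sum_data.filter (fun q => !((PySem.Dict.empty : PySem.Dict String (List String)).contains q.1)) = sum_data := by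
    apply List.filter_eq_self.mpr
    intro q _
    simp [PySem.Dict.contains, PySem.Dict.empty]
  have hempty : (PySem.Dict.empty : PySem.Dict String (List String)).items = [] := rfl
  rw [hfilt, hempty] at hchar
  simp only [List.map_nil, List.nil_append] at hchar
  simp only [aggregate_sum_data, aggregate_sum_data_alt]
  rw [altLoop_eq, List.nil_append, hrel.1, hchar]
  simp
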